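-- pv_equiv track=rewrite | github.com/Arttacker/CipherSecurity | encryption/classic/caesar.py | analyze_known_plaintext_attack
-- ===== SOURCE A (Python) =====
-- def encrypt(plaintext, shift):
--     """
--     Encrypts the plaintext using the Caesar Cipher with the given shift.
--
--     Args:
--     plaintext (str): The plaintext to be encrypted.
--     shift (int): The number of positions each letter should be shifted in the alphabet.
--
--     Returns:
--     str: The encrypted ciphertext.
--     """
--     ciphertext = ""
--     for char in plaintext:
--         if char.isalpha():  # Check if the character is a letter
--             shift_amount = shift % 26  # Ensure the shift is within the range of the alphabet
--             if char.islower():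
--                 encrypted_char = chr((ord(char) - ord('a') + shift_amount) % 26 + ord('a'))
--             else:
--                 encrypted_char = chr((ord(char) - ord('A') + shift_amount) % 26 + ord('A'))
--         else:
--             encrypted_char = char  # Keep non-alphabetic characters unchanged
--         ciphertext += encrypted_char
--     return ciphertext
--
-- def decrypt(ciphertext, shift):
--     """
--     Decrypts the ciphertext encrypted with the Caesar Cipher using the given shift.
--
--     Args:
--     ciphertext (str): The ciphertext to be decrypted.
--     shift (int): The number of positions each letter was shifted in the alphabet.
--
--     Returns:
--     str: The decrypted plaintext.
--     """
--     return encrypt(ciphertext, -shift)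
--
-- def analyze_known_plaintext_attack(plaintext, ciphertext):
--     """
--     Determines the Caesar cipher shift used to encrypt the plaintext to the given ciphertext pair.
--     """
--     key = None
--     for i in range(26):
--         decrypted_text = decrypt(ciphertext, i)
--         if decrypted_text == plaintext:
--             key = i
--             break
--     return key
-- ===== SOURCE B (Python) =====
-- def analyze_known_plaintext_attack(plaintext, ciphertext):
--     """Derive the shift from the first alphabetic ciphertext character, then
--     verify it in a single pass (O(n) instead of trying all 26 shifts)."""
--     if len(plaintext) != len(ciphertext):
--         return None
--     shift = 0
--     for p, c in zip(plaintext, ciphertext):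
--         if c.isalpha():
--             if not p.isalpha() or p.islower() != c.islower():
--                 return None
--             base = ord('a') if c.islower() else ord('A')
--             shift = ((ord(c) - base) - (ord(p) - base)) % 26
--             break
--     for p, c in zip(plaintext, ciphertext):
--         if p.isalpha():
--             base = ord('a') if p.islower() else ord('A')
--             if chr((ord(p) - base + shift) % 26 + base) != c:
--                 return None
--         elif p != c:
--             return None
--     return shift
-- ===== Notes on version B (the rewrite author's own statement) =====
-- stated objective: faster
-- what changed: Instead of re-decrypting the whole ciphertext under all 26 candidate shifts, B derives the unique candidate shift from the first alphabetic ciphertext character and verifies it in one pass over the pair.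
import Mathlib
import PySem

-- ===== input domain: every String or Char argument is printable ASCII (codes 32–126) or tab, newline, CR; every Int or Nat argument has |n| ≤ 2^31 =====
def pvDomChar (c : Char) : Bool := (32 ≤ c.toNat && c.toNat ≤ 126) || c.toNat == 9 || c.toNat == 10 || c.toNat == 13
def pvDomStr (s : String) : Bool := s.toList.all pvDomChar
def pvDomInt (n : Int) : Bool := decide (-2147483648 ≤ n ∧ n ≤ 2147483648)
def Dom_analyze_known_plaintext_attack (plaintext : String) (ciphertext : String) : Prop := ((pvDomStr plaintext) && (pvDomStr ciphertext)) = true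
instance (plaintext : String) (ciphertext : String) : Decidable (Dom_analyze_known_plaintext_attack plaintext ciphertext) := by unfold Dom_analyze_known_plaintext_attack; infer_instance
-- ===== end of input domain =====

-- B derives the candidate shift from the first alphabetic ciphertext character and verifies it
-- in one pass, instead of A's re-decryption of the whole ciphertext under all 26 shifts (faster).


-- ===== PORT A =====
-- one character of encrypt's loop body (the if/else over isalpha/islower)
def pvShiftChar (shift : Int) (c : Char) : Char :=
  if PySem.Chars.isalpha c then
    let shift_amount := PySem.Int.mod shift 26
    if PySem.Chars.islower c then
      Char.ofNat ((PySem.Int.mod ((c.toNat : Int) - 97 + shift_amount) 26).toNat + 97)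
    else
      Char.ofNat ((PySem.Int.mod ((c.toNat : Int) - 65 + shift_amount) 26).toNat + 65)
  else c

-- encrypt: ciphertext = ""; for char in plaintext: ciphertext += encrypted_char
def pvEncrypt (plaintext : List Char) (shift : Int) : List Char :=
  plaintext.foldl (fun acc c => acc ++ [pvShiftChar shift c]) []

-- decrypt(ciphertext, shift) = encrypt(ciphertext, -shift)
def pvDecrypt (ciphertext : List Char) (shift : Int) : List Char :=
  pvEncrypt ciphertext (-shift)

-- the loop: for i in range(26): if decrypt(ciphertext, i) == plaintext: key = i; break
def pvSearch (plaintext ciphertext : List Char) : List Int → Option Int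
  | [] => none
  | i :: rest => if pvDecrypt ciphertext i = plaintext then some i else pvSearch plaintext ciphertext rest

def analyze_known_plaintext_attack (plaintext : String) (ciphertext : String) : Option Int :=
  pvSearch plaintext.toList ciphertext.toList (PySem.List.pyRange 0 26)

-- ===== PORT B =====
-- first loop of Source B: find the first alphabetic ciphertext char and derive the shift
-- (none = Source B's early 'return None'; reaching the end of the zip leaves shift = 0)
def pvDerive : List (Char × Char) → Option Int
  | [] => some 0
  | (p, c) :: rest =>
    if PySem.Chars.isalpha c then
      if !PySem.Chars.isalpha p || (PySem.Chars.islower p != PySem.Chars.islower c) then none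
      else
        let base : Int := if PySem.Chars.islower c then 97 else 65
        some (PySem.Int.mod (((c.toNat : Int) - base) - ((p.toNat : Int) - base)) 26)
    else pvDerive rest

-- second loop of Source B: verify the candidate shift pairwise
def pvVerify (shift : Int) : List (Char × Char) → Bool
  | [] => true
  | (p, c) :: rest =>
    if PySem.Chars.isalpha p then
      let base : Int := if PySem.Chars.islower p then 97 else 65
      (Char.ofNat ((PySem.Int.mod ((p.toNat : Int) - base + shift) 26).toNat + base.toNat) == c) && pvVerify shift rest
    else (p == c) && pvVerify shift rest

def analyze_known_plaintext_attack_alt (plaintext : String) (ciphertext : String) : Option Int :=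
  if plaintext.toList.length ≠ ciphertext.toList.length then none
  else
    match pvDerive (plaintext.toList.zip ciphertext.toList) with
    | none => none
    | some s => if pvVerify s (plaintext.toList.zip ciphertext.toList) then some s else none

-- ===== PRECONDITION & SPEC =====
def Spec_analyze_known_plaintext_attack (plaintext : String) (ciphertext : String) (out : Option Int) : Prop := out = analyze_known_plaintext_attack_alt plaintext ciphertext
instance (plaintext : String) (ciphertext : String) (out : Option Int) : Decidable (Spec_analyze_known_plaintext_attack plaintext ciphertext out) := by unfold Spec_analyze_known_plaintext_attack; infer_instance

-- ===== CLAIM (what is proved, stated in full; the proofs are below) =====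
def Claim_equal_analyze_known_plaintext_attack : Prop := ∀ (plaintext : String) (ciphertext : String), Dom_analyze_known_plaintext_attack plaintext ciphertext → Spec_analyze_known_plaintext_attack plaintext ciphertext (analyze_known_plaintext_attack plaintext ciphertext)

-- ===== LEMMAS AND PROOFS =====

theorem pvChar_eq_of_toNat (a b : Char) (h : a.toNat = b.toNat) : a = b := by
  rw [← Char.ofNat_toNat a, h, Char.ofNat_toNat]

theorem pvToNat_ofNat (n : Nat) (h : n < 55296) : (Char.ofNat n).toNat = n := by
  rw [Char.toNat_ofNat, if_pos (Or.inl h)]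

theorem pvIslower_iff (c : Char) : PySem.Chars.islower c = true ↔ 97 ≤ c.toNat ∧ c.toNat ≤ 122 := by
  simp only [PySem.Chars.islower, Bool.and_eq_true, decide_eq_true_eq, Char.le_def,
    UInt32.le_iff_toNat_le]
  constructor
  · rintro ⟨h1, h2⟩; exact ⟨h1, h2⟩
  · rintro ⟨h1, h2⟩; exact ⟨h1, h2⟩

theorem pvIsupper_iff (c : Char) : PySem.Chars.isupper c = true ↔ 65 ≤ c.toNat ∧ c.toNat ≤ 90 := by
  simp only [PySem.Chars.isupper, Bool.and_eq_true, decide_eq_true_eq, Char.le_def,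
    UInt32.le_iff_toNat_le]
  constructor
  · rintro ⟨h1, h2⟩; exact ⟨h1, h2⟩
  · rintro ⟨h1, h2⟩; exact ⟨h1, h2⟩

theorem pvMod26 (a : Int) : PySem.Int.mod a 26 = a % 26 :=
  PySem.Int.mod_eq_emod_of_pos (by norm_num)

theorem pvShiftChar_lower (k : Int) (c : Char) (h : PySem.Chars.islower c = true) :
    (pvShiftChar k c).toNat = ((((c.toNat : Int) - 97 + k) % 26).toNat + 97) ∧
    PySem.Chars.islower (pvShiftChar k c) = true := by
  have hb := (pvIslower_iff c).1 h
  have ha : PySem.Chars.isalpha c = true := by simp [PySem.Chars.isalpha, h]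
  have hval : ((((c.toNat : Int) - 97 + PySem.Int.mod k 26) % 26).toNat + 97) < 55296 := by
    rw [pvMod26]; omega
  simp only [pvShiftChar, ha, h, if_true, pvMod26]
  rw [pvToNat_ofNat _ (by rw [pvMod26] at hval; exact hval)]
  refine ⟨by omega, ?_⟩
  rw [pvIslower_iff, pvToNat_ofNat _ (by rw [pvMod26] at hval; exact hval)]
  omega

theorem pvShiftChar_upper (k : Int) (c : Char) (h : PySem.Chars.isupper c = true)
    (hl : PySem.Chars.islower c = false) :
    (pvShiftChar k c).toNat = ((((c.toNat : Int) - 65 + k) % 26).toNat + 65) ∧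
    PySem.Chars.isupper (pvShiftChar k c) = true ∧
    PySem.Chars.islower (pvShiftChar k c) = false := by
  have hb := (pvIsupper_iff c).1 h
  have ha : PySem.Chars.isalpha c = true := by simp [PySem.Chars.isalpha, h]
  have hval : ((((c.toNat : Int) - 65 + k) % 26).toNat + 65) < 55296 := by omega
  simp only [pvShiftChar, ha, hl, if_true, Bool.false_eq_true, if_false, pvMod26]
  rw [show ((c.toNat : Int) - 65 + k % 26) % 26 = ((c.toNat : Int) - 65 + k) % 26 by omega]
  rw [pvToNat_ofNat _ hval]
  refine ⟨rfl, ?_, ?_⟩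
  · rw [pvIsupper_iff, pvToNat_ofNat _ hval]; omega
  · rw [Bool.eq_false_iff]
    intro hlo
    rw [pvIslower_iff, pvToNat_ofNat _ hval] at hlo
    omega

theorem pvShiftChar_nonalpha (k : Int) (c : Char) (h : PySem.Chars.isalpha c = false) :
    pvShiftChar k c = c := by
  simp [pvShiftChar, h]

theorem pvAlpha_cases (c : Char) :
    PySem.Chars.islower c = true
    ∨ (PySem.Chars.isupper c = true ∧ PySem.Chars.islower c = false)
    ∨ PySem.Chars.isalpha c = false := by
  rcases hl : PySem.Chars.islower c with _ | _
  · rcases hu : PySem.Chars.isupper c with _ | _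
    · right; right; simp [PySem.Chars.isalpha, hl, hu]
    · right; left; exact ⟨rfl, rfl⟩
  · left; rfl

theorem pvShiftChar_zero (c : Char) : pvShiftChar 0 c = c := by
  rcases pvAlpha_cases c with hl | ⟨hu, hl⟩ | hn
  · refine pvChar_eq_of_toNat _ _ ?_
    rw [(pvShiftChar_lower 0 c hl).1]
    have := (pvIslower_iff c).1 hl
    omega
  · refine pvChar_eq_of_toNat _ _ ?_
    rw [(pvShiftChar_upper 0 c hu hl).1]
    have := (pvIsupper_iff c).1 hu
    omega
  · exact pvShiftChar_nonalpha 0 c hn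

theorem pvShiftChar_inv (k : Int) (c : Char) : pvShiftChar (-k) (pvShiftChar k c) = c := by
  rcases pvAlpha_cases c with hl | ⟨hu, hl⟩ | hn
  · obtain ⟨h1, h2⟩ := pvShiftChar_lower k c hl
    refine pvChar_eq_of_toNat _ _ ?_
    rw [(pvShiftChar_lower (-k) _ h2).1, h1]
    have := (pvIslower_iff c).1 hl
    omega
  · obtain ⟨h1, h2, h3⟩ := pvShiftChar_upper k c hu hl
    refine pvChar_eq_of_toNat _ _ ?_
    rw [(pvShiftChar_upper (-k) _ h2 h3).1, h1]
    have := (pvIsupper_iff c).1 hu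
    omega
  · rw [pvShiftChar_nonalpha k c hn, pvShiftChar_nonalpha (-k) c hn]

theorem pvShiftChar_emod (k : Int) (c : Char) : pvShiftChar (k % 26) c = pvShiftChar k c := by
  have h : PySem.Int.mod (k % 26) 26 = PySem.Int.mod k 26 := by
    rw [pvMod26, pvMod26]; omega
  simp only [pvShiftChar, h]

theorem pvEncrypt_eq_map (s : List Char) (k : Int) : pvEncrypt s k = s.map (pvShiftChar k) := by
  simpa [pvEncrypt] using PySem.List.foldl_append_singleton_eq_map (pvShiftChar k) s []

theorem pvDecrypt_iff (pt ct : List Char) (k : Int) :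
    pvDecrypt ct k = pt ↔ pt.map (pvShiftChar k) = ct := by
  rw [pvDecrypt, pvEncrypt_eq_map]
  constructor
  · intro h
    rw [← h, List.map_map]
    have : ∀ c : Char, pvShiftChar k (pvShiftChar (-k) c) = c := by
      intro c
      simpa using pvShiftChar_inv (-k) c
    simp [Function.comp_def, this]
  · intro h
    rw [← h, List.map_map]
    simp [Function.comp_def, pvShiftChar_inv]

theorem pvSearch_some (pt ct : List Char) (l : List Int) (k : Int)
    (h : pvSearch pt ct l = some k) : k ∈ l ∧ pvDecrypt ct k = pt := by
  induction l with
  | nil => simp [pvSearch] at h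
  | cons i rest ih =>
    rw [pvSearch] at h
    split at h
    · cases h; exact ⟨List.mem_cons_self, by assumption⟩
    · obtain ⟨h1, h2⟩ := ih h
      exact ⟨List.mem_cons_of_mem _ h1, h2⟩

theorem pvSearch_none (pt ct : List Char) (l : List Int)
    (h : ∀ i ∈ l, pvDecrypt ct i ≠ pt) : pvSearch pt ct l = none := by
  induction l with
  | nil => rfl
  | cons i rest ih =>
    rw [pvSearch, if_neg (h i List.mem_cons_self)]
    exact ih (fun j hj => h j (List.mem_cons_of_mem _ hj))

theorem pvSearch_isSome (pt ct : List Char) (l : List Int) (i : Int)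
    (hi : i ∈ l) (h : pvDecrypt ct i = pt) : pvSearch pt ct l ≠ none := by
  induction l with
  | nil => simp at hi
  | cons j rest ih =>
    rw [pvSearch]
    split
    · simp
    · rcases List.mem_cons.1 hi with rfl | hi'
      · simp_all
      · exact ih hi'

-- the per-character check of Source B's verify loop computes exactly A's shifted character
theorem pvVerifyChar_eq (k : Int) (p : Char) (h : PySem.Chars.isalpha p = true) :
    Char.ofNat ((PySem.Int.mod ((p.toNat : Int) -
        (if PySem.Chars.islower p then (97 : Int) else 65) + k) 26).toNat +
      (if PySem.Chars.islower p then (97 : Int) else 65).toNat) = pvShiftChar k p := by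
  rcases pvAlpha_cases p with hl | ⟨hu, hl⟩ | hn
  · have hb := (pvIslower_iff p).1 hl
    refine pvChar_eq_of_toNat _ _ ?_
    rw [(pvShiftChar_lower k p hl).1]
    simp only [hl, if_true, pvMod26]
    rw [pvToNat_ofNat _ (by omega)]
    omega
  · have hb := (pvIsupper_iff p).1 hu
    refine pvChar_eq_of_toNat _ _ ?_
    rw [(pvShiftChar_upper k p hu hl).1]
    simp only [hl, Bool.false_eq_true, if_false, pvMod26]
    rw [pvToNat_ofNat _ (by omega)]
    omega
  · rw [hn] at h; cases h

theorem pvVerify_iff (k : Int) (ps cs : List Char) (hlen : ps.length = cs.length) :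
    pvVerify k (ps.zip cs) = true ↔ ps.map (pvShiftChar k) = cs := by
  induction ps generalizing cs with
  | nil =>
    cases cs with
    | nil => simp [pvVerify]
    | cons c cs' => simp at hlen
  | cons p ps' ih =>
    cases cs with
    | nil => simp at hlen
    | cons c cs' =>
      have hlen' : ps'.length = cs'.length := by simpa using hlen
      rw [List.zip_cons_cons, pvVerify]
      rcases hp : PySem.Chars.isalpha p with _ | _
      · simp only [Bool.false_eq_true, if_false, Bool.and_eq_true, beq_iff_eq,
          List.map_cons, List.cons.injEq, ih cs' hlen', pvShiftChar_nonalpha k p hp]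
      · simp only [if_true, Bool.and_eq_true, beq_iff_eq, List.map_cons,
          List.cons.injEq, ih cs' hlen', pvVerifyChar_eq k p hp]

theorem pvDerive_cases (ps cs : List Char) (hlen : ps.length = cs.length) :
    (pvDerive (ps.zip cs) = none ∧ ∀ k : Int, ps.map (pvShiftChar k) ≠ cs)
    ∨ (∃ s, pvDerive (ps.zip cs) = some s ∧ 0 ≤ s ∧ s < 26 ∧
        ∀ k : Int, ps.map (pvShiftChar k) = cs → k % 26 = s)
    ∨ (pvDerive (ps.zip cs) = some 0 ∧ ∀ k : Int, cs.map (pvShiftChar k) = cs) := by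
  induction ps generalizing cs with
  | nil =>
    cases cs with
    | nil => right; right; exact ⟨rfl, by simp⟩
    | cons c cs' => simp at hlen
  | cons p ps' ih =>
    cases cs with
    | nil => simp at hlen
    | cons c cs' =>
      have hlen' : ps'.length = cs'.length := by simpa using hlen
      rw [List.zip_cons_cons]
      rcases hc : PySem.Chars.isalpha c with _ | _
      · -- c not alphabetic: Source B's loop skips this pair
        rcases ih cs' hlen' with ⟨hd, hno⟩ | ⟨s, hd, hs0, hs26, huniq⟩ | ⟨hd, hfix⟩
        · left
          refine ⟨by simp [pvDerive, hc, hd], ?_⟩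
          intro k hmap
          rw [List.map_cons, List.cons.injEq] at hmap
          exact hno k hmap.2
        · right; left
          refine ⟨s, by simp [pvDerive, hc, hd], hs0, hs26, ?_⟩
          intro k hmap
          rw [List.map_cons, List.cons.injEq] at hmap
          exact huniq k hmap.2
        · right; right
          refine ⟨by simp [pvDerive, hc, hd], ?_⟩
          intro k
          rw [List.map_cons, List.cons.injEq]
          exact ⟨pvShiftChar_nonalpha k c hc, hfix k⟩
      · rcases hbad : (!PySem.Chars.isalpha p || (PySem.Chars.islower p != PySem.Chars.islower c)) with _ | _
        · -- first alphabetic ciphertext char, compatible plaintext char: shift determined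
          rw [Bool.or_eq_false_iff] at hbad
          have hpa : PySem.Chars.isalpha p = true := by simpa using hbad.1
          have hcase : PySem.Chars.islower p = PySem.Chars.islower c := by simpa using hbad.2
          right; left
          refine ⟨PySem.Int.mod (((c.toNat : Int) - (if PySem.Chars.islower c then (97:Int) else 65)) - ((p.toNat : Int) - (if PySem.Chars.islower c then (97:Int) else 65))) 26,
            by simp [pvDerive, hc, hpa, hcase], ?_, ?_, ?_⟩
          · rw [pvMod26]; omega
          · rw [pvMod26]; omega
          · intro k hmap
            rw [List.map_cons, List.cons.injEq] at hmap
            have hhead := congrArg Char.toNat hmap.1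
            rw [pvMod26]
            rcases pvAlpha_cases p with hl | ⟨hu, hl⟩ | hn
            · have hlc : PySem.Chars.islower c = true := hcase ▸ hl
              have hbp := (pvIslower_iff p).1 hl
              have hbc := (pvIslower_iff c).1 hlc
              rw [(pvShiftChar_lower k p hl).1] at hhead
              simp only [hlc, if_true]
              omega
            · have hlc : PySem.Chars.islower c = false := hcase ▸ hl
              have huc : PySem.Chars.isupper c = true := by
                rcases pvAlpha_cases c with h1 | ⟨h1, _⟩ | h1
                · rw [h1] at hlc; cases hlc
                · exact h1
                · rw [h1] at hc; cases hc
              have hbp := (pvIsupper_iff p).1 hu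
              have hbc := (pvIsupper_iff c).1 huc
              rw [(pvShiftChar_upper k p hu hl).1] at hhead
              simp only [hlc]
              omega
            · rw [hn] at hpa; cases hpa
        · -- incompatible pair under an alphabetic ciphertext char: no shift can work
          left
          refine ⟨by simp [pvDerive, hc, hbad], ?_⟩
          intro k hmap
          rw [List.map_cons, List.cons.injEq] at hmap
          have hhead := hmap.1
          rcases (show PySem.Chars.isalpha p = false ∨ PySem.Chars.islower p ≠ PySem.Chars.islower c by
            simpa using hbad) with hpa | hcase
          · rw [pvShiftChar_nonalpha k p hpa] at hhead
            rw [hhead, hc] at hpa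
            cases hpa
          · rcases pvAlpha_cases p with hl | ⟨hu, hl⟩ | hn
            · rw [← hhead, (pvShiftChar_lower k p hl).2, hl] at hcase
              exact hcase rfl
            · rw [← hhead, (pvShiftChar_upper k p hu hl).2.2, hl] at hcase
              exact hcase rfl
            · rw [pvShiftChar_nonalpha k p hn] at hhead
              rw [hhead, hc] at hn
              cases hn

theorem pvMain (pt ct : String) :
    analyze_known_plaintext_attack pt ct = analyze_known_plaintext_attack_alt pt ct := by
  have hmap0 : ∀ l : List Char, l.map (pvShiftChar 0) = l := by
    intro l
    rw [show l.map (pvShiftChar 0) = l.map id from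
      List.map_congr_left fun c _ => pvShiftChar_zero c, List.map_id]
  rw [analyze_known_plaintext_attack, analyze_known_plaintext_attack_alt]
  by_cases hlen : pt.toList.length = ct.toList.length
  case neg =>
    rw [if_pos hlen, pvSearch_none]
    intro i _ hdec
    apply hlen
    rw [← hdec, pvDecrypt, pvEncrypt_eq_map, List.length_map]
  case pos =>
    rw [if_neg (not_not_intro hlen)]
    rcases pvDerive_cases pt.toList ct.toList hlen with
      ⟨hd, hno⟩ | ⟨s, hd, hs0, hs26, huniq⟩ | ⟨hd, hfix⟩
    · rw [hd, pvSearch_none]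
      intro i _ hdec
      exact hno i ((pvDecrypt_iff pt.toList ct.toList i).1 hdec)
    · rw [hd]
      show pvSearch pt.toList ct.toList (PySem.List.pyRange 0 26) =
        if pvVerify s (pt.toList.zip ct.toList) = true then some s else none
      by_cases hver : pt.toList.map (pvShiftChar s) = ct.toList
      · rw [if_pos ((pvVerify_iff s pt.toList ct.toList hlen).2 hver)]
        have hmem : s ∈ PySem.List.pyRange 0 26 := PySem.List.mem_pyRange_one.2 ⟨hs0, hs26⟩
        have hne := pvSearch_isSome pt.toList ct.toList (PySem.List.pyRange 0 26) s hmem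
          ((pvDecrypt_iff pt.toList ct.toList s).2 hver)
        obtain ⟨k, hk⟩ := Option.ne_none_iff_exists'.1 hne
        obtain ⟨hkmem, hkdec⟩ := pvSearch_some pt.toList ct.toList _ k hk
        have hk26 := PySem.List.mem_pyRange_one.1 hkmem
        have := huniq k ((pvDecrypt_iff pt.toList ct.toList k).1 hkdec)
        rw [hk]
        congr 1
        omega
      · rw [if_neg (fun h => hver ((pvVerify_iff s pt.toList ct.toList hlen).1 h)), pvSearch_none]
        intro i _ hdec
        apply hver
        have hmap := (pvDecrypt_iff pt.toList ct.toList i).1 hdec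
        have h26 := huniq i hmap
        rw [← hmap]
        apply List.map_congr_left
        intro c _
        rw [← pvShiftChar_emod i c, h26]
    · rw [hd]
      show pvSearch pt.toList ct.toList (PySem.List.pyRange 0 26) =
        if pvVerify 0 (pt.toList.zip ct.toList) = true then some 0 else none
      by_cases hpc : pt.toList = ct.toList
      · have hdec0 : pvDecrypt ct.toList 0 = pt.toList := by
          rw [pvDecrypt, pvEncrypt_eq_map, neg_zero, hmap0, hpc]
        rw [if_pos ((pvVerify_iff 0 pt.toList ct.toList hlen).2 (by rw [hmap0, hpc]))]
        rw [PySem.List.pyRange_one_cons (by norm_num), pvSearch, if_pos hdec0]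
      · rw [if_neg (fun h => hpc (by
          have := (pvVerify_iff 0 pt.toList ct.toList hlen).1 h
          rwa [hmap0] at this))]
        rw [pvSearch_none]
        intro i _ hdec
        apply hpc
        rw [← hdec, pvDecrypt, pvEncrypt_eq_map, hfix (-i)]

-- ===== VERDICT (by name: the statement is the Claim_ definition above) =====
theorem analyze_known_plaintext_attack_spec : Claim_equal_analyze_known_plaintext_attack := by
  intro pt ct _
  unfold Spec_analyze_known_plaintext_attack
  exact pvMain pt ct
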